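-- pv_equiv track=rewrite | github.com/aa694849243/leetcode_cj | 2025. 分割数组的最多方案数.py | waysToPartition
-- ===== SOURCE A (Python) =====
-- import bisect
-- import collections
-- from typing import List
--
-- def waysToPartition(nums: List[int], k: int) -> int:
--     presum = [nums[0]]
--     for i in range(1, len(nums)):
--         presum.append(presum[i - 1] + nums[i])
--     diffs = [k - num for num in nums]
--     md = collections.defaultdict(list)
--     for i, diff in enumerate(diffs):
--         md[diff].append(i)
--     ans = 0
--     m = collections.defaultdict(int)
--     for i in range(len(nums) - 1):
--         left = presum[i]
--         right = presum[-1] - presum[i]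
--         if left == right:
--             ans += 1
--         else:
--             d = right - left
--             for k in md[d]:
--                 if k <= i:
--                     m[k] += 1
--                 else:
--                     break
--             idx = bisect.bisect_right(md[-d], i)
--             for k in md[-d][idx:]:
--                 if k > i:
--                     m[k] += 1
--     return max(ans, max(m.values())) if m else ans
-- ===== SOURCE B (Python) =====
-- import collections
--
-- def waysToPartition(nums, k):
--     n = len(nums)
--     total = sum(nums)
--     # ds[i] = right - left for pivot i (split between i and i+1)
--     suffix = collections.Counter()
--     ds = []
--     pre = 0
--     for i in range(n - 1):
--         pre += nums[i]
--         d = total - 2 * pre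
--         ds.append(d)
--         suffix[d] += 1
--     ans = suffix[0]
--     best = 0
--     prefix = collections.Counter()
--     for j in range(n):
--         diff = k - nums[j]
--         if diff != 0:
--             best = max(best, prefix[-diff] + suffix[diff])
--         if j < n - 1:
--             suffix[ds[j]] -= 1
--             prefix[ds[j]] += 1
--     return max(ans, best)
-- ===== Notes on version B (the rewrite author's own statement) =====
-- stated objective: alternative
-- what changed: A builds a defaultdict of index lists and, per pivot, rescans those lists with break/bisect while tallying per-index counts in a dict; B instead makes a single sweep keeping two frequency counters (prefix/suffix multiset of pivot differences) and answers each index with two counter lookups.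
import Mathlib
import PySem

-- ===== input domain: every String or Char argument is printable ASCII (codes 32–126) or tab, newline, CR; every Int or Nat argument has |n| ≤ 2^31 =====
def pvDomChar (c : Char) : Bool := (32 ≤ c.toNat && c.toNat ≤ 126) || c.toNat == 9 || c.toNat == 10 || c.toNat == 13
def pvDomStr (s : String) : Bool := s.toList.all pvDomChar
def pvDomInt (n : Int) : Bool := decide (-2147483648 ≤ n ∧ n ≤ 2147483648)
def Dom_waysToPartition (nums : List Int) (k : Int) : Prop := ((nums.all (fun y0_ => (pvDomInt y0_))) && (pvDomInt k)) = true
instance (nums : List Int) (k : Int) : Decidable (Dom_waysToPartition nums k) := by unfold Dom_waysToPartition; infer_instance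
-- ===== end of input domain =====

-- B replaces A's per-pivot scans over index lists (defaultdict of lists + bisect) by two sliding
-- frequency counters updated once per index, a single pass; A raises IndexError on [] (excluded by Pre_).


-- ===== PORT A =====
-- 'for k in md[d]: if k <= i: m[k] += 1 else: break' — the for-loop with break, step for step
def pyLoop1 (i : Int) : List Int → PySem.Dict Int Int → PySem.Dict Int Int
  | [], m => m
  | j :: rest, m => if j ≤ i then pyLoop1 i rest (m.modify j 0 (· + 1)) else m

-- presum = [nums[0]]; for i in range(1, len(nums)): presum.append(presum[i-1] + nums[i])
def aPresum (nums : List Int) : List Int :=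
  (PySem.List.pyRange 1 (nums.length : Int) 1).foldl
    (fun ps i => ps ++ [PySem.List.pyGetD ps (i - 1) 0 + PySem.List.pyGetD nums i 0])
    [PySem.List.pyGetD nums 0 0]

-- md = defaultdict(list); for i, diff in enumerate(diffs): md[diff].append(i)
def aMd (nums : List Int) (k : Int) : PySem.Dict Int (List Int) :=
  (PySem.List.enumerate (nums.map (fun num => k - num)) 0).foldl
    (fun d p => d.modify p.2 [] (fun l => l ++ [p.1])) (PySem.Dict.mk [])

-- one iteration of 'for i in range(len(nums) - 1)'
def aStep (presum : List Int) (md : PySem.Dict Int (List Int))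
    (st : Int × PySem.Dict Int Int) (i : Int) : Int × PySem.Dict Int Int :=
  let left := PySem.List.pyGetD presum i 0
  let right := PySem.List.pyGetD presum (-1) 0 - PySem.List.pyGetD presum i 0
  if left = right then (st.1 + 1, st.2)
  else
    let d := right - left
    let m1 := pyLoop1 i (md.getD d []) st.2
    -- bisect.bisect_right → PySem.List.bisectRight; md[-d][idx:] with 0 ≤ idx is List.drop idx
    let idx := PySem.List.bisectRight (md.getD (-d) []) i
    let m2 := ((md.getD (-d) []).drop idx).foldl
        (fun m j => if i < j then m.modify j 0 (· + 1) else m) m1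
    (st.1, m2)

def waysToPartition (nums : List Int) (k : Int) : Int :=
  match nums with
  | [] => 0  -- Python raises IndexError at nums[0]; excluded by Pre_
  | _ :: _ =>
    let st := (PySem.List.pyRange 0 ((nums.length : Int) - 1) 1).foldl
        (aStep (aPresum nums) (aMd nums k)) (0, PySem.Dict.mk [])
    if st.2.items = [] then st.1
    else max st.1 ((PySem.List.max? st.2.values (fun v => v)).getD 0)

-- ===== PORT B =====
-- first pass: prefix sum, the pivot differences ds, and their suffix counter (all of ds)
def bScan (nums : List Int) (total : Int)
    (st : PySem.Dict Int Int × List Int × Int) (i : Int) : PySem.Dict Int Int × List Int × Int :=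
  let pre := st.2.2 + PySem.List.pyGetD nums i 0
  let d := total - 2 * pre
  (st.1.modify d 0 (· + 1), st.2.1 ++ [d], pre)

-- second pass: per index j, look the needed difference up in the two counters, then slide pivot j
def bStep (nums : List Int) (k : Int) (ds : List Int)
    (st : Int × PySem.Dict Int Int × PySem.Dict Int Int) (j : Int) :
    Int × PySem.Dict Int Int × PySem.Dict Int Int :=
  let diff := k - PySem.List.pyGetD nums j 0
  let best := if diff ≠ 0 then max st.1 (st.2.1.getD (-diff) 0 + st.2.2.getD diff 0) else st.1
  if j < (nums.length : Int) - 1 then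
    let dj := PySem.List.pyGetD ds j 0
    (best, st.2.1.modify dj 0 (· + 1), st.2.2.modify dj 0 (· - 1))
  else (best, st.2.1, st.2.2)

def waysToPartition_alt (nums : List Int) (k : Int) : Int :=
  let s1 := (PySem.List.pyRange 0 ((nums.length : Int) - 1) 1).foldl
      (bScan nums nums.sum) (PySem.Dict.mk [], [], 0)
  let ans := s1.1.getD 0 0
  let s2 := (PySem.List.pyRange 0 (nums.length : Int) 1).foldl
      (bStep nums k s1.2.1) (0, PySem.Dict.mk [], s1.1)
  max ans s2.1

-- ===== PRECONDITION & SPEC =====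
-- Pre_ excludes only the empty list, where A raises IndexError at nums[0].
def Pre_waysToPartition (nums : List Int) (k : Int) : Prop := nums ≠ []
instance (nums : List Int) (k : Int) : Decidable (Pre_waysToPartition nums k) := by unfold Pre_waysToPartition; infer_instance

def pvWitness_waysToPartition : List Int × Int := ([0, 3, -1, 2], 2)

def Spec_waysToPartition (nums : List Int) (k : Int) (out : Int) : Prop := out = waysToPartition_alt nums k
instance (nums : List Int) (k : Int) (out : Int) : Decidable (Spec_waysToPartition nums k out) := by unfold Spec_waysToPartition; infer_instance

-- ===== CLAIM (what is proved, stated in full; the proofs are below) =====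
def Claim_equal_waysToPartition : Prop := ∀ (nums : List Int) (k : Int), Dom_waysToPartition nums k → Pre_waysToPartition nums k → Spec_waysToPartition nums k (waysToPartition nums k)

-- ===== LEMMAS AND PROOFS =====

-- reference objects shared by the two sides
def pvP (nums : List Int) : List Int :=
  (List.range nums.length).map (fun i => (nums.take (i+1)).sum)
def pvDs (nums : List Int) : List Int :=
  (List.range (nums.length - 1)).map (fun i => nums.sum - 2 * (nums.take (i+1)).sum)
def pvDj (nums : List Int) (k : Int) (j : Int) : Int := k - PySem.List.pyGetD nums j 0
-- reducible so that 'decide' finds the standard And/Or/Eq Decidable instances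
abbrev pvPred (nums : List Int) (k : Int) (j : Int) (p : Int × Int) : Prop :=
  (0 ≤ j ∧ j < (nums.length : Int)) ∧ p.2 ≠ 0 ∧
    ((j ≤ p.1 ∧ pvDj nums k j = p.2) ∨ (p.1 < j ∧ pvDj nums k j = -p.2))
def pvAcc (nums : List Int) (k : Int) (m : Nat) (j : Int) : Int :=
  ((PySem.List.enumerate ((pvDs nums).take m) 0).countP (fun p => decide (pvPred nums k j p)) : Int)
def pvMB (nums : List Int) (k : Int) (j : Nat) : Int :=
  if pvDj nums k (j : Int) = 0 then 0
  else (((pvDs nums).take j).count (-(pvDj nums k (j : Int))) : Int)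
       + (((pvDs nums).drop j).count (pvDj nums k (j : Int)) : Int)
def pvMdL (nums : List Int) (k : Int) (d : Int) : List Int :=
  ((PySem.List.enumerate (nums.map (fun num => k - num)) 0).filter (fun p => p.2 == d)).map (·.1)

-- generic utilities
theorem pv_pyGetD_neg_one {α : Type} (l : List α) (d : α) (h : l ≠ []) :
    PySem.List.pyGetD l (-1) d = l.getD (l.length - 1) d := by
  have h0 : 0 < l.length := List.length_pos_iff.mpr h
  simp only [PySem.List.pyGetD, PySem.List.pyGet?, PySem.List.pyIdx?]
  rw [if_neg (by omega), if_pos (by omega)]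
  simp [List.getD]


theorem pv_countP_enumerate_snd (xs : List Int) (s : Int) (f : Int → Bool) :
    (PySem.List.enumerate xs s).countP (fun p => f p.2) = xs.countP f := by
  induction xs generalizing s with
  | nil => simp [PySem.List.enumerate_nil]
  | cons x t ih => simp [PySem.List.enumerate_cons, List.countP_cons, ih]


theorem pv_takeWhile_eq_filter (l : List Int) (i : Int) (h : l.Pairwise (· < ·)) :
    l.takeWhile (fun j => decide (j ≤ i)) = l.filter (fun j => decide (j ≤ i)) := by
  induction l with
  | nil => simp
  | cons x t ih =>
    rcases List.pairwise_cons.mp h with ⟨hx, ht⟩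
    by_cases hxi : x ≤ i
    · simp [List.takeWhile_cons, List.filter_cons, hxi, ih ht]
    · have hnil : List.filter (fun j => decide (j ≤ i)) t = [] := by
        apply List.filter_eq_nil_iff.mpr
        intro a ha
        simp only [decide_eq_true_eq]
        exact fun hai => hxi (le_trans (hx a ha).le hai)
      simp [List.filter_cons, hxi, hnil]


theorem pv_drop_bisectRight (l : List Int) (i : Int) (h : l.Pairwise (· < ·)) :
    l.drop (PySem.List.bisectRight l i) = l.filter (fun j => decide (i < j)) := by
  have hle : l.Pairwise (· ≤ ·) := h.imp le_of_lt
  obtain ⟨hlen, hbefore, hafter⟩ := PySem.List.bisectRight_spec l i hle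
  set t := PySem.List.bisectRight l i with ht
  conv_lhs => rw [← List.take_append_drop t l]
  rw [List.drop_append_of_le_length (by simp [hlen])]
  conv_rhs => rw [← List.take_append_drop t l]
  rw [List.filter_append]
  have h1 : (l.take t).filter (fun j => decide (i < j)) = [] := by
    apply List.filter_eq_nil_iff.mpr
    intro a ha
    simp only [decide_eq_true_eq, not_lt]
    obtain ⟨j, hj, rfl⟩ := List.mem_take_iff_getElem.mp ha
    exact hbefore j (by omega) (by omega)
  have h2 : (l.drop t).filter (fun j => decide (i < j)) = l.drop t := by
    apply List.filter_eq_self.mpr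
    intro a ha
    simp only [decide_eq_true_eq]
    obtain ⟨j, hj, rfl⟩ := List.mem_drop_iff_getElem.mp ha
    exact hafter (t + j) (by omega) (by omega)
  rw [h1, h2]
  simp [List.drop_append_of_le_length, hlen]


theorem pv_pyLoop1_eq (i : Int) (l : List Int) (m : PySem.Dict Int Int) :
    pyLoop1 i l m
      = (l.takeWhile (fun j => decide (j ≤ i))).foldl (fun m j => m.modify j 0 (· + 1)) m := by
  induction l generalizing m with
  | nil => simp [pyLoop1]
  | cons x t ih =>
    by_cases hx : x ≤ i
    · simp [pyLoop1, hx, List.takeWhile_cons, ih]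
    · simp [pyLoop1, hx, List.takeWhile_cons]


-- facts about pvP / pvDs
theorem pvP_length (nums : List Int) : (pvP nums).length = nums.length := by
  simp [pvP]
theorem pvP_getElem (nums : List Int) (i : Nat) (h : i < nums.length) :
    (pvP nums)[i]'(by simp [pvP_length, h]) = (nums.take (i+1)).sum := by
  simp [pvP]
theorem pvDs_length (nums : List Int) : (pvDs nums).length = nums.length - 1 := by
  simp [pvDs]
theorem pvDs_getElem (nums : List Int) (i : Nat) (h : i < nums.length - 1) :
    (pvDs nums)[i]'(by simp [pvDs_length, h]) = nums.sum - 2 * (nums.take (i+1)).sum := by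
  simp [pvDs]

theorem aPresum_eq (nums : List Int) (h : nums ≠ []) : aPresum nums = pvP nums := by
  have hn : 1 ≤ nums.length := List.length_pos_iff.mpr h
  have key : ∀ m : Nat, 1 ≤ m → m ≤ nums.length →
      (PySem.List.pyRange 1 (m : Int) 1).foldl
        (fun ps i => ps ++ [PySem.List.pyGetD ps (i - 1) 0 + PySem.List.pyGetD nums i 0])
        [PySem.List.pyGetD nums 0 0] = (pvP nums).take m := by
    intro m
    induction m with
    | zero => omega
    | succ m ih =>
      intro _ hle
      by_cases hm1 : m = 0
      · subst hm1
        rw [PySem.List.pyRange_one_eq_nil (by norm_num)]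
        have h0 : (pvP nums)[0]? = some ((nums.take 1).sum) := by
          rw [List.getElem?_eq_getElem (by rw [pvP_length]; omega)]
          rw [pvP_getElem nums 0 (by omega)]
        have h0l : 0 < nums.length := by omega
        simp only [List.foldl_nil, List.take_succ, List.take_zero, List.nil_append, h0,
          Option.toList_some]
        rw [PySem.List.pyGetD_of_nonneg nums 0 (by norm_num)]
        simp [List.getElem?_eq_getElem h0l, List.getD_eq_getElem nums 0 h0l]
      · have hm : 1 ≤ m := by omega
        have hcast : ((m + 1 : Nat) : Int) = (m : Int) + 1 := by push_cast; ring
        rw [hcast, PySem.List.pyRange_one_succ_right (by exact_mod_cast hm), List.foldl_append,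
          ih hm (by omega)]
        simp only [List.foldl_cons, List.foldl_nil]
        have hidx : ((m : Int) - 1) = ((m - 1 : Nat) : Int) := by omega
        rw [hidx, PySem.List.pyGetD_natCast, PySem.List.pyGetD_natCast]
        have hlt : m - 1 < ((pvP nums).take m).length := by
          rw [List.length_take, pvP_length]; omega
        rw [List.getD_eq_getElem _ _ hlt, List.getElem_take,
          List.getD_eq_getElem nums 0 (show m < nums.length by omega)]
        rw [pvP_getElem nums (m-1) (by omega)]
        have hmm : m - 1 + 1 = m := by omega
        rw [hmm]
        rw [← List.sum_take_succ nums m (by omega)]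
        have hnext : (pvP nums)[m]? = some ((nums.take (m+1)).sum) := by
          rw [List.getElem?_eq_getElem (by rw [pvP_length]; omega)]
          rw [pvP_getElem nums m (by omega)]
        rw [List.take_succ (l := pvP nums) (i := m), hnext]
        simp
  have := key nums.length hn le_rfl
  rw [aPresum] at *
  rw [this, List.take_of_length_le (by rw [pvP_length])]


theorem pvP_last (nums : List Int) (h : nums ≠ []) :
    PySem.List.pyGetD (pvP nums) (-1) 0 = nums.sum := by
  have hn : 1 ≤ nums.length := List.length_pos_iff.mpr h
  have hne : pvP nums ≠ [] := by
    intro hc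
    have := pvP_length nums
    rw [hc] at this
    simp at this
    omega
  rw [pv_pyGetD_neg_one _ _ hne, pvP_length]
  rw [List.getD_eq_getElem _ _ (by rw [pvP_length]; omega)]
  rw [pvP_getElem nums (nums.length - 1) (by omega)]
  have : nums.length - 1 + 1 = nums.length := by omega
  rw [this, List.take_of_length_le le_rfl]


-- md characterization
theorem aMd_getD (nums : List Int) (k : Int) (d : Int) :
    (aMd nums k).getD d [] = pvMdL nums k d := by
  have h1 : (aMd nums k).getD d []
      = (((PySem.List.enumerate (List.map (fun num => k - num) nums) 0).map Prod.swap).foldl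
          (fun dd p => dd.modify p.1 [] (fun l => l ++ [p.2])) (PySem.Dict.mk [])).getD d [] := by
    rw [aMd, List.foldl_map]
    rfl
  rw [h1, PySem.Dict.getD_foldl_modify_append, pvMdL]
  have he : (PySem.Dict.mk ([] : List (Int × List Int))).getD d [] = [] := rfl
  rw [he]
  simp [List.filter_map, List.map_map, Function.comp_def]


theorem pvMdL_pairwise (nums : List Int) (k : Int) (d : Int) :
    (pvMdL nums k d).Pairwise (· < ·) := by
  rw [pvMdL]
  apply List.Pairwise.map
  · exact fun a b hab => hab
  · exact (PySem.List.pairwise_lt_enumerate _ 0).filter _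


theorem mem_pvMdL (nums : List Int) (k : Int) (d : Int) (j : Int) :
    j ∈ pvMdL nums k d ↔ (0 ≤ j ∧ j < (nums.length : Int)) ∧ pvDj nums k j = d := by
  rw [pvMdL]
  constructor
  · intro hj
    obtain ⟨p, hp, rfl⟩ := List.mem_map.mp hj
    rcases List.mem_filter.mp hp with ⟨hpe, hpd⟩
    obtain ⟨kn, hkn, rfl⟩ := (PySem.List.mem_enumerate_iff _ _ _).mp hpe
    simp only [List.length_map] at hkn
    simp only [List.getElem_map] at hpd
    have hget : PySem.List.pyGetD nums ((0:Int) + (kn : Int)) 0 = nums[kn] := by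
      rw [zero_add, PySem.List.pyGetD_natCast, List.getD_eq_getElem nums 0 hkn]
    constructor
    · constructor
      · omega
      · push_cast; omega
    · rw [pvDj, hget]
      exact of_decide_eq_true hpd
  · rintro ⟨⟨h0, hlt⟩, hd⟩
    apply List.mem_map.mpr
    refine ⟨((j.toNat : Int), k - nums[j.toNat]'(by omega)), ?_, by simp; omega⟩
    apply List.mem_filter.mpr
    constructor
    · apply (PySem.List.mem_enumerate_iff _ _ _).mpr
      refine ⟨j.toNat, by simpa using (by omega : j.toNat < nums.length), ?_⟩
      simp [List.getElem_map]
    · simp only [beq_iff_eq]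
      rw [← hd, pvDj, PySem.List.pyGetD_of_nonneg nums 0 h0,
        List.getD_eq_getElem nums 0 (by omega)]


theorem pvAcc_nonneg (nums : List Int) (k : Int) (m : Nat) (j : Int) : 0 ≤ pvAcc nums k m j := by
  simp [pvAcc]

theorem pvAcc_succ (nums : List Int) (k : Int) (m : Nat) (hm : m < (pvDs nums).length) (j : Int) :
    pvAcc nums k (m+1) j
      = pvAcc nums k m j
        + (if pvPred nums k j ((m : Int), (pvDs nums)[m]) then 1 else 0) := by
  rw [pvAcc, pvAcc, List.take_succ, List.getElem?_eq_getElem hm, Option.toList_some,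
    PySem.List.enumerate_append, List.countP_append]
  have hlen : ((pvDs nums).take m).length = m := by
    rw [List.length_take]; omega
  rw [hlen]
  simp only [PySem.List.enumerate_cons, PySem.List.enumerate_nil, List.countP_cons,
    List.countP_nil, zero_add]
  push_cast
  by_cases hp : pvPred nums k j ((m : Int), (pvDs nums)[m])
  · simp [hp]
  · simp [hp]

-- A-side loop invariant
def StA (nums : List Int) (k : Int) (m : Nat) (st : Int × PySem.Dict Int Int) : Prop :=
  st.1 = (((pvDs nums).take m).count 0 : Int)
  ∧ st.2.keys.Nodup
  ∧ (∀ j : Int, st.2.contains j = true ↔ 0 < pvAcc nums k m j)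
  ∧ (∀ j : Int, st.2.getD j 0 = pvAcc nums k m j)

theorem aStep_inv (nums : List Int) (k : Int) (h : nums ≠ []) (m : Nat)
    (hm : m < nums.length - 1) (st : Int × PySem.Dict Int Int) (hst : StA nums k m st) :
    StA nums k (m+1) (aStep (pvP nums) (aMd nums k) st (m : Int)) := by
  obtain ⟨h1, h2, h3, h4⟩ := hst
  have hn1 : 1 ≤ nums.length := List.length_pos_iff.mpr h
  have hmP : m < nums.length := by omega
  have hmD : m < (pvDs nums).length := by rw [pvDs_length]; omega
  have hleft : PySem.List.pyGetD (pvP nums) (m : Int) 0 = (nums.take (m+1)).sum := by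
    rw [PySem.List.pyGetD_natCast, List.getD_eq_getElem _ 0 (by rw [pvP_length]; omega),
      pvP_getElem nums m hmP]
  have hlast := pvP_last nums h
  have hdsm : (pvDs nums)[m]'hmD = nums.sum - 2 * (nums.take (m+1)).sum :=
    pvDs_getElem nums m (by omega)
  simp only [aStep, hleft, hlast]
  by_cases hz : (nums.take (m+1)).sum = nums.sum - (nums.take (m+1)).sum
  · rw [if_pos hz]
    have hzero : (pvDs nums)[m]'hmD = 0 := by rw [hdsm]; omega
    refine ⟨?_, h2, ?_, ?_⟩
    · rw [List.take_succ, List.getElem?_eq_getElem hmD, Option.toList_some, List.count_append,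
        hzero]
      simp [h1]
    · intro j
      rw [pvAcc_succ nums k m hmD j, if_neg (by rw [hzero]; exact fun hc => hc.2.1 rfl)]
      simpa using h3 j
    · intro j
      rw [pvAcc_succ nums k m hmD j, if_neg (by rw [hzero]; exact fun hc => hc.2.1 rfl)]
      simpa using h4 j
  · rw [if_neg hz]
    have hdz : (pvDs nums)[m]'hmD ≠ 0 := by rw [hdsm]; omega
    set S := (nums.take (m+1)).sum with hS
    have hD : nums.sum - S - S = (pvDs nums)[m]'hmD := by rw [hdsm]; ring
    -- the two scanned lists
    set L1 := (pvMdL nums k ((pvDs nums)[m]'hmD)).filter (fun j => decide (j ≤ (m : Int))) with hL1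
    set L2 := (pvMdL nums k (-((pvDs nums)[m]'hmD))).filter (fun j => decide ((m : Int) < j)) with hL2
    have hloop1 : pyLoop1 (m : Int) ((aMd nums k).getD (nums.sum - S - S) []) st.2
        = L1.foldl (fun m j => m.modify j 0 (· + 1)) st.2 := by
      rw [aMd_getD, hD, pv_pyLoop1_eq,
        pv_takeWhile_eq_filter _ _ (pvMdL_pairwise nums k _)]
    have hloop2 : ∀ (m1 : PySem.Dict Int Int),
        (((aMd nums k).getD (-(nums.sum - S - S)) []).drop
            (PySem.List.bisectRight ((aMd nums k).getD (-(nums.sum - S - S)) []) (m : Int))).foldl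
          (fun mm j => if (m : Int) < j then mm.modify j 0 (· + 1) else mm) m1
        = L2.foldl (fun mm j => mm.modify j 0 (· + 1)) m1 := by
      intro m1
      rw [aMd_getD, hD, pv_drop_bisectRight _ _ (pvMdL_pairwise nums k _)]
      apply PySem.List.foldl_congr_mem
      intro acc x hx
      rcases List.mem_filter.mp hx with ⟨_, hxm⟩
      rw [if_pos (by simpa using hxm)]
    rw [hloop1, hloop2]
    -- membership characterizations
    have hmem1 : ∀ j : Int, j ∈ L1 ↔
        ((0 ≤ j ∧ j < (nums.length : Int)) ∧ pvDj nums k j = (pvDs nums)[m]'hmD ∧ j ≤ (m : Int)) := by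
      intro j
      rw [hL1, List.mem_filter, mem_pvMdL]
      simp only [decide_eq_true_eq]
      tauto
    have hmem2 : ∀ j : Int, j ∈ L2 ↔
        ((0 ≤ j ∧ j < (nums.length : Int)) ∧ pvDj nums k j = -((pvDs nums)[m]'hmD) ∧ (m : Int) < j) := by
      intro j
      rw [hL2, List.mem_filter, mem_pvMdL]
      simp only [decide_eq_true_eq]
      tauto
    have hnd1 : L1.Nodup := ((pvMdL_pairwise nums k _).imp ne_of_lt).filter _
    have hnd2 : L2.Nodup := ((pvMdL_pairwise nums k _).imp ne_of_lt).filter _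
    have hpred : ∀ j : Int, pvPred nums k j ((m : Int), (pvDs nums)[m]'hmD) ↔ (j ∈ L1 ∨ j ∈ L2) := by
      intro j
      rw [hmem1, hmem2, pvPred]
      constructor
      · rintro ⟨hb, -, hcase | hcase⟩
        · exact Or.inl ⟨hb, hcase.2, hcase.1⟩
        · exact Or.inr ⟨hb, hcase.2, hcase.1⟩
      · rintro (⟨hb, hd2, hle2⟩ | ⟨hb, hd2, hlt2⟩)
        · exact ⟨hb, hdz, Or.inl ⟨hle2, hd2⟩⟩
        · exact ⟨hb, hdz, Or.inr ⟨hlt2, hd2⟩⟩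
    have hdisj : ∀ j : Int, ¬(j ∈ L1 ∧ j ∈ L2) := by
      intro j ⟨hj1, hj2⟩
      rcases (hmem1 j).mp hj1 with ⟨-, hd1, -⟩
      rcases (hmem2 j).mp hj2 with ⟨-, hd2, -⟩
      rw [hd1] at hd2
      omega
    have hcount : ∀ j : Int,
        (L1.count j : Int) + (L2.count j : Int)
          = (if pvPred nums k j ((m : Int), (pvDs nums)[m]'hmD) then 1 else 0) := by
      intro j
      by_cases hj1 : j ∈ L1
      · rw [List.count_eq_one_of_mem hnd1 hj1,
          List.count_eq_zero_of_not_mem (fun hj2 => hdisj j ⟨hj1, hj2⟩),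
          if_pos ((hpred j).mpr (Or.inl hj1))]
        rfl
      · by_cases hj2 : j ∈ L2
        · rw [List.count_eq_zero_of_not_mem hj1, List.count_eq_one_of_mem hnd2 hj2,
            if_pos ((hpred j).mpr (Or.inr hj2))]
          rfl
        · rw [List.count_eq_zero_of_not_mem hj1, List.count_eq_zero_of_not_mem hj2,
            if_neg (fun hp => (not_or.mpr ⟨hj1, hj2⟩) ((hpred j).mp hp))]
          rfl
    refine ⟨?_, ?_, ?_, ?_⟩
    · rw [List.take_succ, List.getElem?_eq_getElem hmD, Option.toList_some, List.count_append]
      have : ([(pvDs nums)[m]'hmD].count 0) = 0 := by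
        simp [List.count_singleton]
        omega
      rw [this]
      simpa using h1
    · exact PySem.Dict.nodup_keys_foldl_modify_key L2 (fun x => x) 0 (fun _ _ => (· + 1)) _
        (PySem.Dict.nodup_keys_foldl_modify_key L1 (fun x => x) 0 (fun _ _ => (· + 1)) _ h2)
    · intro j
      rw [PySem.Dict.contains_iff_mem_keys, PySem.Dict.keys_foldl_modify,
        PySem.Dict.keys_foldl_modify, PySem.Set.mem_update, PySem.Set.mem_update,
        pvAcc_succ nums k m hmD j]
      have hc := h3 j
      rw [PySem.Dict.contains_iff_mem_keys] at hc
      have hnn := pvAcc_nonneg nums k m j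
      by_cases hp : pvPred nums k j ((m : Int), (pvDs nums)[m]'hmD)
      · rw [if_pos hp]
        rcases (hpred j).mp hp with hj | hj
        · constructor
          · intro _; omega
          · intro _; exact Or.inl (Or.inr hj)
        · constructor
          · intro _; omega
          · intro _; exact Or.inr hj
      · rw [if_neg hp]
        have hnot := fun hj => hp ((hpred j).mpr hj)
        constructor
        · rintro ((hk | hj1) | hj2)
          · simpa using hc.mp hk
          · exact absurd (Or.inl hj1) hnot
          · exact absurd (Or.inr hj2) hnot
        · intro hpos
          exact Or.inl (Or.inl (hc.mpr (by omega)))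
    · intro j
      rw [PySem.Dict.getD_foldl_modify_add_one, PySem.Dict.getD_foldl_modify_add_one,
        h4 j, pvAcc_succ nums k m hmD j, add_assoc, hcount j]


theorem aLoop_inv (nums : List Int) (k : Int) (h : nums ≠ []) (m : Nat)
    (hm : m ≤ nums.length - 1) :
    StA nums k m ((PySem.List.pyRange 0 (m : Int) 1).foldl
      (aStep (pvP nums) (aMd nums k)) (0, PySem.Dict.mk [])) := by
  induction m with
  | zero =>
    rw [show ((0:Nat):Int) = 0 from rfl, PySem.List.pyRange_one_eq_nil le_rfl]
    simp only [StA, pvAcc, List.take_nil, List.take_zero, PySem.List.enumerate_nil,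
      List.countP_nil, List.count_nil]
    exact ⟨rfl, by simp [PySem.Dict.keys], by intro j; simp [PySem.Dict.contains_mk], fun j => rfl⟩
  | succ m ih =>
    rw [show ((m+1:Nat):Int) = (m:Int)+1 by push_cast; ring,
      PySem.List.pyRange_one_succ_right (by positivity), List.foldl_append]
    simp only [List.foldl_cons, List.foldl_nil]
    exact aStep_inv nums k h m (by omega) _ (ih (by omega))


-- the bridge: A's per-index totals are B's two-counter values
theorem pv_countP_enumerate_eq_count (xs : List Int) (s : Int) (P : Int × Int → Prop)
    [DecidablePred P] (v : Int)
    (hiff : ∀ p ∈ PySem.List.enumerate xs s, P p ↔ p.2 = v) :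
    (PySem.List.enumerate xs s).countP (fun p => decide (P p)) = xs.count v := by
  rw [List.countP_congr (q := fun p => p.2 == v)
    (by intro p hp; simpa using hiff p hp)]
  exact pv_countP_enumerate_snd xs s (fun x => x == v)

theorem pvAcc_eq_pvMB (nums : List Int) (k : Int) (j : Nat) (hj : j < nums.length) :
    pvAcc nums k (nums.length - 1) (j : Int) = pvMB nums k j := by
  have hn1 : 1 ≤ nums.length := by omega
  have hfull : (pvDs nums).take (nums.length - 1) = pvDs nums :=
    List.take_of_length_le (by rw [pvDs_length])
  rw [pvAcc, hfull, pvMB]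
  by_cases hz : pvDj nums k (j : Int) = 0
  · rw [if_pos hz]
    have : (PySem.List.enumerate (pvDs nums) 0).countP
        (fun p => decide (pvPred nums k (j : Int) p)) = 0 := by
      apply List.countP_eq_zero.mpr
      intro p _
      simp only [decide_eq_true_eq]
      rintro ⟨-, hnz, ⟨-, hdd⟩ | ⟨-, hdd⟩⟩
      · rw [hz] at hdd; exact hnz hdd.symm
      · rw [hz] at hdd; omega
    rw [this]
    rfl
  · rw [if_neg hz]
    have hjlen : ((pvDs nums).take j).length = j := by
      rw [List.length_take, pvDs_length]; omega
    conv_lhs => rw [← List.take_append_drop j (pvDs nums)]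
    rw [PySem.List.enumerate_append, List.countP_append, hjlen, zero_add]
    have hiff1 : ∀ p ∈ PySem.List.enumerate ((pvDs nums).take j) 0,
        pvPred nums k (j : Int) p ↔ p.2 = -(pvDj nums k (j : Int)) := by
      intro p hp
      obtain ⟨kk, hkk, rfl⟩ := (PySem.List.mem_enumerate_iff _ _ _).mp hp
      rw [hjlen] at hkk
      simp only [pvPred]
      constructor
      · rintro ⟨-, -, ⟨hle, hd⟩ | ⟨-, hd⟩⟩
        · omega
        · omega
      · intro hd
        refine ⟨⟨by omega, by omega⟩, by omega, Or.inr ⟨by omega, by omega⟩⟩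
    have hiff2 : ∀ p ∈ PySem.List.enumerate ((pvDs nums).drop j) (j : Int),
        pvPred nums k (j : Int) p ↔ p.2 = pvDj nums k (j : Int) := by
      intro p hp
      obtain ⟨kk, hkk, rfl⟩ := (PySem.List.mem_enumerate_iff _ _ _).mp hp
      simp only [pvPred]
      constructor
      · rintro ⟨-, -, ⟨-, hd⟩ | ⟨hlt, hd⟩⟩
        · omega
        · omega
      · intro hd
        refine ⟨⟨by omega, by omega⟩, by omega, Or.inl ⟨by omega, by omega⟩⟩
    rw [pv_countP_enumerate_eq_count ((pvDs nums).take j) 0 _ _ hiff1,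
      pv_countP_enumerate_eq_count ((pvDs nums).drop j) (j : Int) _ _ hiff2]
    push_cast
    ring

theorem pvAcc_out_of_range (nums : List Int) (k : Int) (m : Nat) (j : Int)
    (hj : ¬ (0 ≤ j ∧ j < (nums.length : Int))) : pvAcc nums k m j = 0 := by
  rw [pvAcc]
  have : (PySem.List.enumerate ((pvDs nums).take m) 0).countP
      (fun p => decide (pvPred nums k j p)) = 0 := by
    apply List.countP_eq_zero.mpr
    intro p _
    simp only [decide_eq_true_eq]
    intro hpred
    exact hj hpred.1
  rw [this]
  rfl


-- B-side: first pass
theorem bScan_inv (nums : List Int) (m : Nat) (hm : m ≤ nums.length - 1) :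
    (PySem.List.pyRange 0 (m : Int) 1).foldl (bScan nums nums.sum) (PySem.Dict.mk [], [], 0)
      = (((pvDs nums).take m).foldl (fun d x => d.modify x 0 (· + 1)) (PySem.Dict.mk []),
         (pvDs nums).take m, (nums.take m).sum) := by
  induction m with
  | zero =>
    rw [show ((0:Nat):Int) = 0 from rfl, PySem.List.pyRange_one_eq_nil le_rfl]
    simp
  | succ m ih =>
    have hn1 : 1 ≤ nums.length := by omega
    have hmn : m < nums.length := by omega
    rw [show ((m+1:Nat):Int) = (m:Int)+1 by push_cast; ring,
      PySem.List.pyRange_one_succ_right (by positivity), List.foldl_append, ih (by omega)]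
    simp only [List.foldl_cons, List.foldl_nil, bScan]
    have hget : PySem.List.pyGetD nums (m:Int) 0 = nums[m] := by
      rw [PySem.List.pyGetD_natCast, List.getD_eq_getElem nums 0 hmn]
    rw [hget, ← List.sum_take_succ nums m hmn]
    rw [show (pvDs nums).take (m+1)
        = (pvDs nums).take m ++ [nums.sum - 2 * (nums.take (m+1)).sum] by
      rw [List.take_succ, List.getElem?_eq_getElem (by rw [pvDs_length]; omega),
        pvDs_getElem nums m (by omega)]
      rfl]
    simp [List.foldl_append]


-- B-side: second pass invariant
def StB (nums : List Int) (k : Int) (m : Nat)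
    (st : Int × PySem.Dict Int Int × PySem.Dict Int Int) : Prop :=
  st.1 = (List.range m).foldl (fun b j => max b (pvMB nums k j)) 0
  ∧ (∀ v : Int, st.2.1.getD v 0 = (((pvDs nums).take m).count v : Int))
  ∧ (∀ v : Int, st.2.2.getD v 0 = ((pvDs nums).count v : Int) - (((pvDs nums).take m).count v : Int))

theorem bStep_inv (nums : List Int) (k : Int) (m : Nat) (hm : m < nums.length)
    (st : Int × PySem.Dict Int Int × PySem.Dict Int Int) (hst : StB nums k m st) :
    StB nums k (m+1) (bStep nums k (pvDs nums) st (m : Int)) := by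
  obtain ⟨h1, h2, h3⟩ := hst
  have hsplit : ∀ v : Int, ((pvDs nums).count v : Int)
      = (((pvDs nums).take m).count v : Int) + (((pvDs nums).drop m).count v : Int) := by
    intro v
    conv_lhs => rw [← List.take_append_drop m (pvDs nums)]
    rw [List.count_append]
    push_cast
    ring
  have hbest0 : 0 ≤ st.1 := by
    rw [h1]
    exact (PySem.List.le_foldl_max_int (List.range m) (pvMB nums k) 0).1
  have hbestref : (List.range (m+1)).foldl (fun b j => max b (pvMB nums k j)) 0
      = max ((List.range m).foldl (fun b j => max b (pvMB nums k j)) 0) (pvMB nums k m) := by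
    rw [List.range_succ, List.foldl_append]
    rfl
  have hdiff : k - PySem.List.pyGetD nums (m : Int) 0 = pvDj nums k (m : Int) := rfl
  have hbest : (if pvDj nums k (m : Int) ≠ 0
        then max st.1 (st.2.1.getD (-(pvDj nums k (m : Int))) 0 + st.2.2.getD (pvDj nums k (m : Int)) 0)
        else st.1)
      = (List.range (m+1)).foldl (fun b j => max b (pvMB nums k j)) 0 := by
    by_cases hz : pvDj nums k (m : Int) = 0
    · rw [if_neg (not_not_intro hz)]
      have hmb : pvMB nums k m = 0 := by rw [pvMB, if_pos hz]
      rw [hbestref, ← h1, hmb, max_eq_left hbest0]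
    · rw [if_pos hz]
      have hmb : pvMB nums k m
          = st.2.1.getD (-(pvDj nums k (m : Int))) 0 + st.2.2.getD (pvDj nums k (m : Int)) 0 := by
        rw [pvMB, if_neg hz, h2, h3, hsplit]
        ring
      rw [hbestref, ← h1, ← hmb]
  simp only [bStep, hdiff]
  by_cases hlt : (m : Int) < (nums.length : Int) - 1
  · rw [if_pos hlt]
    have hmD : m < (pvDs nums).length := by rw [pvDs_length]; omega
    have hdget : PySem.List.pyGetD (pvDs nums) (m : Int) 0 = (pvDs nums)[m] := by
      rw [PySem.List.pyGetD_natCast, List.getD_eq_getElem _ 0 hmD]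
    have htk : (pvDs nums).take (m+1) = (pvDs nums).take m ++ [(pvDs nums)[m]] := by
      rw [List.take_succ, List.getElem?_eq_getElem hmD]
      rfl
    have hc1 : ∀ v : Int, List.count v [(pvDs nums)[m]'hmD] = if v = (pvDs nums)[m]'hmD then 1 else 0 := by
      intro v
      by_cases hv : v = (pvDs nums)[m]'hmD
      · simp [hv]
      · rw [if_neg hv]
        exact List.count_eq_zero.mpr (by simp [hv])
    refine ⟨hbest, ?_, ?_⟩
    · intro v
      rw [hdget, PySem.Dict.getD_modify, htk, List.count_append, hc1 v]
      split_ifs with hv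
      · rw [← hv, h2 v]
        push_cast
        ring
      · rw [h2 v]
        push_cast
        ring
    · intro v
      rw [hdget, PySem.Dict.getD_modify, htk, List.count_append, hc1 v]
      split_ifs with hv
      · rw [← hv, h3 v]
        push_cast
        ring
      · rw [h3 v]
        push_cast
        ring
  · rw [if_neg hlt]
    have htk : (pvDs nums).take (m+1) = (pvDs nums).take m := by
      rw [List.take_of_length_le (by rw [pvDs_length]; omega),
        List.take_of_length_le (by rw [pvDs_length]; omega)]
    exact ⟨hbest, by intro v; rw [h2 v, htk], by intro v; rw [h3 v, htk]⟩

theorem bLoop_inv (nums : List Int) (k : Int) (m : Nat) (hm : m ≤ nums.length) :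
    StB nums k m ((PySem.List.pyRange 0 (m : Int) 1).foldl (bStep nums k (pvDs nums))
      (0, PySem.Dict.mk [], ((pvDs nums).foldl (fun d x => d.modify x 0 (· + 1)) (PySem.Dict.mk [])))) := by
  induction m with
  | zero =>
    rw [show ((0:Nat):Int) = 0 from rfl, PySem.List.pyRange_one_eq_nil le_rfl]
    simp only [List.foldl_nil]
    refine ⟨rfl, fun v => rfl, fun v => ?_⟩
    rw [PySem.Dict.getD_foldl_modify_add_one]
    have h0 : (PySem.Dict.mk ([] : List (Int × Int))).getD v 0 = 0 := rfl
    rw [h0]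
    simp
  | succ m ih =>
    rw [show ((m+1:Nat):Int) = (m:Int)+1 by push_cast; ring,
      PySem.List.pyRange_one_succ_right (by positivity), List.foldl_append]
    simp only [List.foldl_cons, List.foldl_nil]
    exact bStep_inv nums k m (by omega) _ (ih (by omega))


theorem alt_eq (nums : List Int) (k : Int) (h : nums ≠ []) :
    waysToPartition_alt nums k
      = max ((pvDs nums).count 0 : Int)
          ((List.range nums.length).foldl (fun b j => max b (pvMB nums k j)) 0) := by
  have hn1 : 1 ≤ nums.length := List.length_pos_iff.mpr h
  have hcast : ((nums.length : Int)) - 1 = ((nums.length - 1 : Nat) : Int) := by omega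
  have htk : (pvDs nums).take (nums.length - 1) = pvDs nums :=
    List.take_of_length_le (by rw [pvDs_length])
  rw [waysToPartition_alt]
  rw [hcast, bScan_inv nums (nums.length - 1) le_rfl]
  simp only [htk]
  have hs2 := bLoop_inv nums k nums.length le_rfl
  obtain ⟨hb, -, -⟩ := hs2
  rw [hb]
  have hans : ((pvDs nums).foldl (fun d x => d.modify x 0 (· + 1)) (PySem.Dict.mk [])).getD 0 0
      = ((pvDs nums).count 0 : Int) := by
    rw [PySem.Dict.getD_foldl_modify_add_one]
    have h0 : (PySem.Dict.mk ([] : List (Int × Int))).getD 0 0 = 0 := rfl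
    rw [h0]
    simp
  rw [hans]


theorem a_eq (nums : List Int) (k : Int) (h : nums ≠ []) :
    waysToPartition nums k
      = (fun st : Int × PySem.Dict Int Int =>
          if st.2.items = [] then st.1
          else max st.1 ((PySem.List.max? st.2.values (fun v => v)).getD 0))
        ((PySem.List.pyRange 0 ((nums.length - 1 : Nat) : Int) 1).foldl
          (aStep (pvP nums) (aMd nums k)) (0, PySem.Dict.mk [])) := by
  obtain ⟨x, xs, rfl⟩ := List.exists_cons_of_ne_nil h
  simp only [waysToPartition]
  rw [aPresum_eq _ h,
    show (((x :: xs).length : Int) - 1) = (((x :: xs).length - 1 : Nat) : Int) by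
      simp only [List.length_cons]; omega]

-- ===== VERDICT (by name: the statement is the Claim_ definition above) =====
theorem waysToPartition_spec : Claim_equal_waysToPartition := by
  intro nums k hdom hpre
  show waysToPartition nums k = waysToPartition_alt nums k
  rw [a_eq nums k hpre, alt_eq nums k hpre]
  have hn1 : 1 ≤ nums.length := List.length_pos_iff.mpr hpre
  obtain ⟨hans, hnd, hcont, hgetD⟩ := aLoop_inv nums k hpre (nums.length - 1) le_rfl
  set st := (PySem.List.pyRange 0 ((nums.length - 1 : Nat) : Int) 1).foldl
    (aStep (pvP nums) (aMd nums k)) (0, PySem.Dict.mk []) with hstdef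
  simp only []
  have htkfull : (pvDs nums).take (nums.length - 1) = pvDs nums :=
    List.take_of_length_le (by rw [pvDs_length])
  rw [htkfull] at hans
  have hacc := fun (j : Nat) (hj : j < nums.length) => pvAcc_eq_pvMB nums k j hj
  set B := (List.range nums.length).foldl (fun b j => max b (pvMB nums k j)) 0 with hBdef
  have hble := PySem.List.le_foldl_max_int (List.range nums.length) (pvMB nums k) 0
  have hbmem : B = 0 ∨ B ∈ (List.range nums.length).map (pvMB nums k) := by
    have hmm := PySem.List.foldl_max_mem ((List.range nums.length).map (pvMB nums k)) 0
    rw [List.foldl_map] at hmm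
    exact hmm
  by_cases hemp : st.2.items = []
  · rw [if_pos hemp]
    have hkeys : st.2.keys = [] := by
      simp only [PySem.Dict.keys, hemp, List.map_nil]
    have hMB0 : ∀ j : Nat, j < nums.length → pvMB nums k j = 0 := by
      intro j hj
      rw [← hacc j hj]
      have hc := hcont (j : Int)
      rw [PySem.Dict.contains_iff_mem_keys, hkeys] at hc
      have hnn := pvAcc_nonneg nums k (nums.length - 1) (j : Int)
      have hnot : ¬ 0 < pvAcc nums k (nums.length - 1) (j : Int) := fun hp => by simpa using hc.mpr hp
      omega
    have hB0 : B = 0 := by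
      rcases hbmem with h0 | hmem
      · exact h0
      · obtain ⟨j, hj, hBe⟩ := List.mem_map.mp hmem
        rw [← hBe]
        exact hMB0 j (List.mem_range.mp hj)
    rw [hans, hB0]
    exact (max_eq_left (Int.natCast_nonneg _)).symm
  · rw [if_neg hemp]
    cases hmax : PySem.List.max? st.2.values (fun v => v) with
    | none =>
      rw [PySem.List.max?_eq_none_iff] at hmax
      simp only [PySem.Dict.values, List.map_eq_nil_iff] at hmax
      exact absurd hmax hemp
    | some v =>
      have hvmem := PySem.List.max?_mem hmax
      have hvmax := PySem.List.max?_isMax hmax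
      simp only [PySem.Dict.values] at hvmem hvmax
      obtain ⟨⟨p1, p2⟩, hpitems, hpv⟩ := List.mem_map.mp hvmem
      have hget : st.2.getD p1 0 = p2 := PySem.Dict.getD_of_mem_items st.2 hpitems hnd 0
      have hv1 : pvAcc nums k (nums.length - 1) p1 = v := by
        rw [← hgetD p1, hget]
        exact hpv
      have hkey : p1 ∈ st.2.keys := PySem.Dict.mem_keys_of_mem_items st.2 hpitems
      have hpos : 0 < pvAcc nums k (nums.length - 1) p1 :=
        (hcont p1).mp ((PySem.Dict.contains_iff_mem_keys _ _).mpr hkey)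
      have hrange : 0 ≤ p1 ∧ p1 < (nums.length : Int) := by
        by_contra hc
        rw [pvAcc_out_of_range nums k _ p1 hc] at hpos
        exact lt_irrefl 0 hpos
      have hj0 : p1.toNat < nums.length := by omega
      have hcast : ((p1.toNat : Nat) : Int) = p1 := by omega
      have hvMB : pvMB nums k p1.toNat = v := by
        rw [← hacc p1.toNat hj0, hcast, hv1]
      have hvpos : 0 < v := by omega
      have hBv : v ≤ B := by
        have hh := hble.2 p1.toNat (List.mem_range.mpr hj0)
        rw [hvMB] at hh
        exact hh
      have hvB : B ≤ v := by
        rcases hbmem with h0 | hmem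
        · omega
        · obtain ⟨j1, hj1mem, hBj⟩ := List.mem_map.mp hmem
          have hj1 : j1 < nums.length := List.mem_range.mp hj1mem
          by_cases hp1 : 0 < pvAcc nums k (nums.length - 1) (j1 : Int)
          · have hcon := (hcont (j1 : Int)).mpr hp1
            have hk1 : (j1 : Int) ∈ st.2.keys := (PySem.Dict.contains_iff_mem_keys _ _).mp hcon
            have hitems := PySem.Dict.items_eq_map_keys st.2 hnd 0
            have hmem1 : ((j1 : Int), st.2.getD (j1 : Int) 0) ∈ st.2.items := by
              rw [hitems]
              exact List.mem_map.mpr ⟨(j1 : Int), hk1, rfl⟩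
            have hvmem1 : st.2.getD (j1 : Int) 0 ∈ st.2.items.map (fun x => x.2) :=
              List.mem_map.mpr ⟨_, hmem1, rfl⟩
            have hle1 := hvmax _ hvmem1
            rw [hgetD (j1 : Int), hacc j1 hj1, hBj] at hle1
            exact hle1
          · have hz1 : pvAcc nums k (nums.length - 1) (j1 : Int) = 0 := by
              have := pvAcc_nonneg nums k (nums.length - 1) (j1 : Int)
              omega
            rw [← hBj, ← hacc j1 hj1, hz1]
            omega
      have hBveq : B = v := le_antisymm hvB hBv
      rw [Option.getD_some, hans, hBveq]
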